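-- pv_equiv track=rewrite | github.com/harshrajbhar20/AI-Powered-STAAD.Pro-.std-Generator-Full-3D-PEB-Models-with-UR-Servi | staad_generator.py | _range_from_list
-- ===== SOURCE A (Python) =====
-- from typing import Any, Dict, List, Optional, Tuple, Union
--
-- def _range_from_list(sorted_ids: List[int]) -> str:
--     """Convert a sorted list of IDs to a range string."""
--     if not sorted_ids:
--         return ""
--     ranges: List[str] = []
--     start = sorted_ids[0]
--     end = sorted_ids[0]
--     for m in sorted_ids[1:]:
--         if m == end + 1:
--             end = m
--         else:
--             ranges.append(f"{start} TO {end}" if start != end else str(start))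
--             start = m
--             end = m
--     ranges.append(f"{start} TO {end}" if start != end else str(start))
--     return " ".join(ranges)
-- ===== SOURCE B (Python) =====
-- # B: idiomatic itertools.groupby formulation -- runs are found by the constant
-- # (value - index) key over enumerate, then each run is formatted and joined.
-- from itertools import groupby
--
-- def _range_from_list(sorted_ids):
--     pieces = []
--     for _, grp in groupby(enumerate(sorted_ids), key=lambda p: p[1] - p[0]):
--         run = [v for _, v in grp]
--         first, last = run[0], run[-1]
--         pieces.append(str(first) if first == last else f"{first} TO {last}")
--     return " ".join(pieces)
-- ===== Notes on version B (the rewrite author's own statement) =====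
-- stated objective: idiomatic
-- what changed: Replaces the explicit start/end state machine with itertools.groupby over enumerate keyed by (value - index), which is constant within each consecutive run; each group is materialized and formatted from its first and last values.
import Mathlib
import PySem

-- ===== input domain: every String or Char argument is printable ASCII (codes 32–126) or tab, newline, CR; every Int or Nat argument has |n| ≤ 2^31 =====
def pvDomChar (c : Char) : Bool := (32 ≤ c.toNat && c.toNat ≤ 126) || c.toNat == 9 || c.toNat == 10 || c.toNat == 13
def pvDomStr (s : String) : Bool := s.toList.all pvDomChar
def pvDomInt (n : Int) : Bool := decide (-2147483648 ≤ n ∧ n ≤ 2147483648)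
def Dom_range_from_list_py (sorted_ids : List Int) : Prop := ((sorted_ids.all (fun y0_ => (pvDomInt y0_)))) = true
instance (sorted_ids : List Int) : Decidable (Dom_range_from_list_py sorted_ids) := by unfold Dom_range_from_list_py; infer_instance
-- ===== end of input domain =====

-- B re-implements the run detection with an itertools.groupby over enumerate with key
-- (value - index); objective: idiomatic. Both programs are total; equivalence on all lists.

-- ===== PORT A =====
-- f"{start} TO {end}" if start != end else str(start)
def pvFmtA (s e : Int) : String :=
  if s ≠ e then PySem.Str.join "" [PySem.Int.toStr s, " TO ", PySem.Int.toStr e]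
  else PySem.Int.toStr s

def range_from_list_py (sorted_ids : List Int) : String :=
  match sorted_ids with
  | [] => ""
  | h :: t =>  -- start = end = sorted_ids[0]; loop over sorted_ids[1:]
    let st := t.foldl (fun (acc : List String × Int × Int) m =>
        if m = acc.2.2 + 1 then (acc.1, acc.2.1, m)
        else (acc.1 ++ [pvFmtA acc.2.1 acc.2.2], m, m)) ([], h, h)
    PySem.Str.join " " (st.1 ++ [pvFmtA st.2.1 st.2.2])

-- ===== PORT B =====
-- itertools.groupby(..., key = p.2 - p.1): maximal blocks of equal key, left to right
def pvKeyGroups : List (Int × Int) → List (List (Int × Int))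
  | [] => []
  | x :: xs =>
    (x :: xs.takeWhile (fun p => p.2 - p.1 == x.2 - x.1)) ::
      pvKeyGroups (xs.dropWhile (fun p => p.2 - p.1 == x.2 - x.1))
  termination_by l => l.length
  decreasing_by
    exact Nat.lt_succ_of_le (List.length_dropWhile_le _ _)

-- run = [v for _, v in grp]; str(run[0]) if run[0] == run[-1] else f"{run[0]} TO {run[-1]}"
-- (groups are nonempty by construction, so the .getD 0 defaults are never used)
def pvPiece (run : List (Int × Int)) : String :=
  let vals := run.map (·.2)
  let first := vals.head?.getD 0
  let last := vals.getLast?.getD 0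
  if first = last then PySem.Int.toStr first
  else PySem.Str.join "" [PySem.Int.toStr first, " TO ", PySem.Int.toStr last]

def range_from_list_py_alt (sorted_ids : List Int) : String :=
  PySem.Str.join " " ((pvKeyGroups (PySem.List.enumerate sorted_ids 0)).map pvPiece)

-- ===== PRECONDITION & SPEC =====
def Spec_range_from_list_py (sorted_ids : List Int) (out : String) : Prop := out = range_from_list_py_alt sorted_ids
instance (sorted_ids : List Int) (out : String) : Decidable (Spec_range_from_list_py sorted_ids out) := by unfold Spec_range_from_list_py; infer_instance

-- ===== CLAIM (what is proved, stated in full; the proofs are below) =====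
def Claim_equal_range_from_list_py : Prop := ∀ (sorted_ids : List Int), Dom_range_from_list_py sorted_ids → Spec_range_from_list_py sorted_ids (range_from_list_py sorted_ids)

-- ===== LEMMAS AND PROOFS =====

-- common intermediate: the list of maximal (+1)-runs as (start, end) pairs
def pvRunsGo (s e : Int) : List Int → List (Int × Int)
  | [] => [(s, e)]
  | m :: t => if m = e + 1 then pvRunsGo s m t else (s, e) :: pvRunsGo m m t

def pvRuns : List Int → List (Int × Int)
  | [] => []
  | h :: t => pvRunsGo h h t

-- the (+1)-consecutive prefix after a run end e, and the remainder
def pvTake (e : Int) : List Int → List Int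
  | [] => []
  | m :: t => if m = e + 1 then m :: pvTake m t else []

def pvDrop (e : Int) : List Int → List Int
  | [] => []
  | m :: t => if m = e + 1 then pvDrop m t else m :: t

lemma pvDrop_length_le (t : List Int) : ∀ e, (pvDrop e t).length ≤ t.length := by
  induction t with
  | nil => intro e; simp [pvDrop]
  | cons m t ih =>
    intro e
    simp only [pvDrop]
    split
    · exact Nat.le_succ_of_le (ih m)
    · simp

-- A's loop equals pvRunsGo rendered with pvFmtA
lemma foldA (t : List Int) : ∀ (ranges : List String) (s e : Int),
    (let st := t.foldl (fun (acc : List String × Int × Int) m =>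
        if m = acc.2.2 + 1 then (acc.1, acc.2.1, m)
        else (acc.1 ++ [pvFmtA acc.2.1 acc.2.2], m, m)) (ranges, s, e)
     st.1 ++ [pvFmtA st.2.1 st.2.2])
    = ranges ++ (pvRunsGo s e t).map (fun p => pvFmtA p.1 p.2) := by
  induction t with
  | nil => intro ranges s e; simp [pvRunsGo]
  | cons m t ih =>
    intro ranges s e
    simp only [List.foldl_cons, pvRunsGo]
    by_cases h : m = e + 1
    · simpa [h] using ih ranges s m
    · simpa [h] using ih (ranges ++ [pvFmtA s e]) m m

-- takeWhile / dropWhile of the (value - index) key over an enumeration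
lemma takeW (t : List Int) : ∀ (j e : Int),
    (PySem.List.enumerate t j).takeWhile (fun p => p.2 - p.1 == e + 1 - j)
      = PySem.List.enumerate (pvTake e t) j := by
  induction t with
  | nil => intro j e; simp [pvTake, PySem.List.enumerate_nil]
  | cons m t ih =>
    intro j e
    by_cases h : m = e + 1
    · subst h
      rw [PySem.List.enumerate_cons, List.takeWhile_cons]
      have hc : (((j, e + 1).2 - (j, e + 1).1 : Int) == e + 1 - j) = true := by simp
      rw [hc, if_pos rfl, pvTake, if_pos rfl, PySem.List.enumerate_cons]
      have hp : (fun p : Int × Int => p.2 - p.1 == e + 1 - j)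
          = (fun p : Int × Int => p.2 - p.1 == (e + 1) + 1 - (j + 1)) := by
        funext q
        rw [show ((e : Int) + 1 - j) = (e + 1) + 1 - (j + 1) by omega]
      rw [hp, ih (j + 1) (e + 1)]
    · have hb : ((m - j : Int) == e + 1 - j) = false := by
        simp; omega
      simp [PySem.List.enumerate_cons, pvTake, h, hb]

lemma dropW (t : List Int) : ∀ (j e : Int),
    (PySem.List.enumerate t j).dropWhile (fun p => p.2 - p.1 == e + 1 - j)
      = PySem.List.enumerate (pvDrop e t) (j + (pvTake e t).length) := by
  induction t with
  | nil => intro j e; simp [pvDrop, pvTake, PySem.List.enumerate_nil]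
  | cons m t ih =>
    intro j e
    by_cases h : m = e + 1
    · subst h
      rw [PySem.List.enumerate_cons, List.dropWhile_cons]
      have hc : (((j, e + 1).2 - (j, e + 1).1 : Int) == e + 1 - j) = true := by simp
      rw [hc, if_pos rfl, pvDrop, if_pos rfl, pvTake, if_pos rfl]
      have hp : (fun p : Int × Int => p.2 - p.1 == e + 1 - j)
          = (fun p : Int × Int => p.2 - p.1 == (e + 1) + 1 - (j + 1)) := by
        funext q
        rw [show ((e : Int) + 1 - j) = (e + 1) + 1 - (j + 1) by omega]
      rw [hp, ih (j + 1) (e + 1)]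
      congr 1
      push_cast [List.length_cons]
      ring
    · have hb : ((m - j : Int) == e + 1 - j) = false := by simp; omega
      simp [PySem.List.enumerate_cons, pvDrop, pvTake, h, hb]

lemma runsGo_eq (t : List Int) : ∀ s e,
    pvRunsGo s e t = (s, (pvTake e t).getLastD e) :: pvRuns (pvDrop e t) := by
  induction t with
  | nil => intro s e; simp [pvRunsGo, pvTake, pvDrop, pvRuns]
  | cons m t ih =>
    intro s e
    by_cases h : m = e + 1
    · subst h
      rw [pvRunsGo, if_pos rfl, pvTake, if_pos rfl, pvDrop, if_pos rfl,
        List.getLastD_cons, ih s (e + 1)]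
    · simp [pvRunsGo, pvTake, pvDrop, h, pvRuns]

lemma fmtAB (s e : Int) :
    (if s = e then PySem.Int.toStr s
     else PySem.Str.join "" [PySem.Int.toStr s, " TO ", PySem.Int.toStr e]) = pvFmtA s e := by
  by_cases h : s = e <;> simp [pvFmtA, h]

lemma piece_cons (i h : Int) (t₁ : List Int) :
    pvPiece ((i, h) :: PySem.List.enumerate t₁ (i + 1)) = pvFmtA h (t₁.getLastD h) := by
  have hv : ((i, h) :: PySem.List.enumerate t₁ (i + 1)).map (·.2) = h :: t₁ := by
    simp [PySem.List.map_snd_enumerate]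
  have hl : (h :: t₁).getLast?.getD 0 = t₁.getLastD h := by
    cases t₁ with
    | nil => simp
    | cons a l =>
      rw [List.getLast?_cons_cons, List.getLastD_eq_getLast?]
      cases e : (a :: l).getLast? with
      | none => simp at e
      | some x => simp
  rw [pvPiece, hv]
  simp only [List.head?_cons, Option.getD_some, hl]
  exact fmtAB h (t₁.getLastD h)

-- main B-side lemma: groups of the enumeration render the runs
lemma groupsB : ∀ (n : Nat) (ids : List Int), ids.length ≤ n → ∀ (i : Int),
    (pvKeyGroups (PySem.List.enumerate ids i)).map pvPiece
      = (pvRuns ids).map (fun p => pvFmtA p.1 p.2) := by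
  intro n
  induction n with
  | zero =>
    intro ids hlen i
    have : ids = [] := List.eq_nil_of_length_eq_zero (Nat.le_zero.mp hlen)
    subst this
    simp [PySem.List.enumerate_nil, pvKeyGroups, pvRuns]
  | succ n ih =>
    intro ids hlen i
    cases ids with
    | nil => simp [PySem.List.enumerate_nil, pvKeyGroups, pvRuns]
    | cons h t =>
      rw [PySem.List.enumerate_cons, pvKeyGroups]
      have hkey : (h - i : Int) = h + 1 - (i + 1) := by omega
      have ht : (PySem.List.enumerate t (i + 1)).takeWhile (fun p => p.2 - p.1 == h - i)
          = PySem.List.enumerate (pvTake h t) (i + 1) := by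
        rw [hkey]; exact takeW t (i + 1) h
      have hd : (PySem.List.enumerate t (i + 1)).dropWhile (fun p => p.2 - p.1 == h - i)
          = PySem.List.enumerate (pvDrop h t) ((i + 1) + (pvTake h t).length) := by
        rw [hkey]; exact dropW t (i + 1) h
      simp only [ht, hd, List.map_cons]
      have hlen' : (pvDrop h t).length ≤ n := by
        have := pvDrop_length_le t h
        simp at hlen
        omega
      rw [ih (pvDrop h t) hlen' ((i + 1) + (pvTake h t).length)]
      rw [piece_cons i h (pvTake h t)]
      show _ = (pvRuns (h :: t)).map (fun p => pvFmtA p.1 p.2)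
      rw [show pvRuns (h :: t) = pvRunsGo h h t from rfl, runsGo_eq t h h]
      simp

-- ===== VERDICT (by name: the statement is the Claim_ definition above) =====
theorem range_from_list_py_spec : Claim_equal_range_from_list_py := by
  intro ids _
  unfold Spec_range_from_list_py
  cases ids with
  | nil =>
    show "" = PySem.Str.join " " _
    rw [PySem.List.enumerate_nil]
    rw [show pvKeyGroups ([] : List (Int × Int)) = [] from by rw [pvKeyGroups]]
    rfl
  | cons h t =>
    show PySem.Str.join " " _ = _
    rw [range_from_list_py_alt, groupsB t.length.succ (h :: t) (by simp) 0]
    have := foldA t [] h h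
    simp only [List.nil_append] at this
    rw [show pvRuns (h :: t) = pvRunsGo h h t from rfl, ← this]
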